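-- pv_equiv track=rewrite | github.com/chengchenzhang/advent2021 | 7_day/sol.py | is_min
-- ===== SOURCE A (Python) =====
-- def is_min(p_input, point, mag_list):
-- 	dif_list = [mag_list[abs(point - x)] for x in p_input]
-- 	dif_p1 = [mag_list[abs(point+1 - x)] for x in p_input]
-- 	dif_m1 = [mag_list[abs(point-1 - x)] for x in p_input]
-- 	s_l = sum(dif_list)
-- 	s_p1 = sum(dif_p1)
-- 	s_m1 = sum(dif_m1)
-- 	return [s_l, s_p1, s_m1]
-- ===== SOURCE B (Python) =====
-- def is_min(p_input, point, mag_list):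
--     freq = {}
--     for x in p_input:
--         freq[x] = freq.get(x, 0) + 1
--     s_l = 0
--     s_p1 = 0
--     s_m1 = 0
--     for v, c in freq.items():
--         s_l += c * mag_list[abs(point - v)]
--         s_p1 += c * mag_list[abs(point + 1 - v)]
--         s_m1 += c * mag_list[abs(point - 1 - v)]
--     return [s_l, s_p1, s_m1]
-- ===== Notes on version B (the rewrite author's own statement) =====
-- stated objective: alternative
-- what changed: Replaces three full per-element scans (three list comprehensions plus three sums) by one frequency-table aggregation pass over p_input followed by a single pass over the distinct values accumulating count*cost for all three offsets at once.
import Mathlib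
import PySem

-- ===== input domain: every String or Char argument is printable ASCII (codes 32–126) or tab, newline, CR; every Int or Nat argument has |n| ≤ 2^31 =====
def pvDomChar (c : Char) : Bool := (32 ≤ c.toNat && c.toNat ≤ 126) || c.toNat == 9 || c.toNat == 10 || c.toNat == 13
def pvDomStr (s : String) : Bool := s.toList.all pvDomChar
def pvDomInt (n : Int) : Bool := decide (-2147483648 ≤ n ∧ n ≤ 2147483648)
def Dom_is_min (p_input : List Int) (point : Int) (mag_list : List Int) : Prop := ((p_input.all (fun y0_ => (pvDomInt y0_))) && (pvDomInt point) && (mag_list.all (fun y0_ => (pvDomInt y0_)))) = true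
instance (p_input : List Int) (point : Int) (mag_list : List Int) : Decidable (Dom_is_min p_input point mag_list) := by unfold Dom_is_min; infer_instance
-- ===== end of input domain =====

-- One honest line: B aggregates a frequency table once and sums count*cost over
-- distinct values for the three offsets in one pass, instead of A's three
-- per-element comprehensions; same results, structure differs.

-- mag_list[abs(i)]: exact on Pre_ (index in range); 0 stands in for Python's IndexError outside Pre_
def pvIdxAbs (mag_list : List Int) (i : Int) : Int :=
  (PySem.List.pyGet? mag_list |i|).getD 0

-- ===== PORT A =====
def is_min (p_input : List Int) (point : Int) (mag_list : List Int) : List Int :=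
  let dif_list := p_input.map (fun x => pvIdxAbs mag_list (point - x))
  let dif_p1 := p_input.map (fun x => pvIdxAbs mag_list (point + 1 - x))
  let dif_m1 := p_input.map (fun x => pvIdxAbs mag_list (point - 1 - x))
  let s_l := dif_list.sum
  let s_p1 := dif_p1.sum
  let s_m1 := dif_m1.sum
  [s_l, s_p1, s_m1]

-- ===== PORT B =====
def is_min_alt (p_input : List Int) (point : Int) (mag_list : List Int) : List Int :=
  let freq := p_input.foldl (fun d x => d.insert x (d.getD x 0 + 1)) PySem.Dict.empty
  let s := freq.items.foldl
    (fun (s : Int × Int × Int) vc =>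
      (s.1 + vc.2 * pvIdxAbs mag_list (point - vc.1),
       s.2.1 + vc.2 * pvIdxAbs mag_list (point + 1 - vc.1),
       s.2.2 + vc.2 * pvIdxAbs mag_list (point - 1 - vc.1)))
    (0, 0, 0)
  [s.1, s.2.1, s.2.2]

-- ===== PRECONDITION & SPEC =====
-- Pre_ excludes exactly the inputs where Python A raises IndexError (some |offset - x| ≥ len(mag_list)).
def Pre_is_min (p_input : List Int) (point : Int) (mag_list : List Int) : Prop :=
  ∀ x ∈ p_input, (point - x).natAbs < mag_list.length ∧
    (point + 1 - x).natAbs < mag_list.length ∧ (point - 1 - x).natAbs < mag_list.length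
instance (p_input : List Int) (point : Int) (mag_list : List Int) : Decidable (Pre_is_min p_input point mag_list) := by unfold Pre_is_min; infer_instance

def pvWitness_is_min : List Int × Int × List Int := ([0, 1, 1, -1], 0, [5, 6, 7])

def Spec_is_min (p_input : List Int) (point : Int) (mag_list : List Int) (out : List Int) : Prop := out = is_min_alt p_input point mag_list
instance (p_input : List Int) (point : Int) (mag_list : List Int) (out : List Int) : Decidable (Spec_is_min p_input point mag_list out) := by unfold Spec_is_min; infer_instance

-- ===== CLAIM (what is proved, stated in full; the proofs are below) =====
def Claim_equal_is_min : Prop := ∀ (p_input : List Int) (point : Int) (mag_list : List Int), Dom_is_min p_input point mag_list → Pre_is_min p_input point mag_list → Spec_is_min p_input point mag_list (is_min p_input point mag_list)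

-- ===== LEMMAS AND PROOFS =====

-- three-way accumulating fold = three independent map-sums
theorem foldl_triple (l : List (Int × Int)) (g1 g2 g3 : Int × Int → Int) :
    ∀ a b c : Int,
      l.foldl (fun (s : Int × Int × Int) vc =>
        (s.1 + g1 vc, s.2.1 + g2 vc, s.2.2 + g3 vc)) (a, b, c)
      = (a + (l.map g1).sum, b + (l.map g2).sum, c + (l.map g3).sum) := by
  induction l with
  | nil => intro a b c; simp
  | cons hd tl ih =>
    intro a b c
    simp only [List.foldl_cons, List.map_cons, List.sum_cons, ih]
    refine Prod.ext (by ring) (Prod.ext (by ring) (by ring))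

-- summing count v * f v over the distinct values of xs = summing f over xs
theorem sum_over_distinct (xs : List Int) (f : Int → Int) :
    ((PySem.Set.ofList xs).map (fun v => (xs.count v : Int) * f v)).sum
      = (xs.map f).sum := by
  have hnd : (PySem.Set.ofList xs).Nodup := PySem.Set.nodup_ofList xs
  have hfin : (PySem.Set.ofList xs).toFinset = xs.toFinset := by
    ext v
    simp [List.mem_toFinset, PySem.Set.mem_ofList]
  calc ((PySem.Set.ofList xs).map (fun v => (xs.count v : Int) * f v)).sum
      = (PySem.Set.ofList xs).toFinset.sum (fun v => (xs.count v : Int) * f v) :=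
        (List.sum_toFinset _ hnd).symm
    _ = xs.toFinset.sum (fun v => (xs.count v : Int) * f v) := by rw [hfin]
    _ = (xs.map f).sum := by
        rw [Finset.sum_list_map_count]
        refine Finset.sum_congr rfl (fun v _ => ?_)
        simp

-- ===== VERDICT (by name: the statement is the Claim_ definition above) =====
theorem is_min_spec : Claim_equal_is_min := by
  intro p_input point mag_list _ _
  show is_min p_input point mag_list = is_min_alt p_input point mag_list
  simp only [is_min, is_min_alt,
    PySem.Dict.foldl_insert_getD_add_one_eq_counter, PySem.Dict.items_counter,
    foldl_triple, List.map_map, zero_add]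
  have h : ∀ g : Int → Int,
      ((PySem.Set.ofList p_input).map
        ((fun vc : Int × Int => vc.2 * g vc.1) ∘ fun k => (k, (p_input.count k : Int)))).sum
      = (p_input.map g).sum := by
    intro g
    have := sum_over_distinct p_input g
    simpa [Function.comp] using this
  rw [h (fun x => pvIdxAbs mag_list (point - x)),
      h (fun x => pvIdxAbs mag_list (point + 1 - x)),
      h (fun x => pvIdxAbs mag_list (point - 1 - x))]
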